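-- pv_equiv track=rewrite | github.com/khortur/PiRO | projekt2/normalizer.py | find_4_points
-- ===== SOURCE A (Python) =====
-- def find_4_points(img_bin):
--     a, b, c, d = [0, 0], [0, 0], [0, 0], [0, 0]
--     t = True
--
--     for i in range(len(img_bin)):
--         for j in range(len(img_bin[i])):
--             if img_bin[i][j] == 255:
--                 if t:
--                     a = [j, i]
--                     t = False
--                 c = [j, i]
--
--     t = True
--     for j in range(len(img_bin[0])):
--         for i in range(len(img_bin)):
--             if img_bin[i][j] == 255:
--                 if t:
--                     b = [j, i]
--                     t = False
--                 d = [j, i]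
--
--     return [a, b, c, d]
-- ===== SOURCE B (Python) =====
-- def find_4_points(img_bin):
--     pts = [(i, j) for i, row in enumerate(img_bin) for j, v in enumerate(row) if v == 255]
--     if not pts:
--         return [[0, 0], [0, 0], [0, 0], [0, 0]]
--     ai, aj = min(pts)
--     ci, cj = max(pts)
--     bj, bi = min((j, i) for (i, j) in pts)
--     dj, di = max((j, i) for (i, j) in pts)
--     return [[aj, ai], [bj, bi], [cj, ci], [dj, di]]
-- ===== Notes on version B (the rewrite author's own statement) =====
-- stated objective: simpler
-- what changed: B collects all white-pixel coordinates in one comprehension pass and reads the four extreme points off min/max with lexicographic (row,col) and (col,row) keys, instead of A's two flag-driven nested index scans; Pre_ excludes only the inputs where A raises IndexError (empty image, or a row shorter than row 0).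
-- intended difference: On ragged images where some row has a 255 in a column >= len(img_bin[0]), A's column scan stops at column len(img_bin[0])-1 and silently misses that pixel in b/d, while B computes the extremes over all white pixels, which are the intended extreme points of the image. — e.g. on find_4_points([[255], [0, 255]]): A returns [[0, 0], [0, 0], [1, 1], [0, 0]], B returns [[0, 0], [0, 0], [1, 1], [1, 1]]
import Mathlib
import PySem

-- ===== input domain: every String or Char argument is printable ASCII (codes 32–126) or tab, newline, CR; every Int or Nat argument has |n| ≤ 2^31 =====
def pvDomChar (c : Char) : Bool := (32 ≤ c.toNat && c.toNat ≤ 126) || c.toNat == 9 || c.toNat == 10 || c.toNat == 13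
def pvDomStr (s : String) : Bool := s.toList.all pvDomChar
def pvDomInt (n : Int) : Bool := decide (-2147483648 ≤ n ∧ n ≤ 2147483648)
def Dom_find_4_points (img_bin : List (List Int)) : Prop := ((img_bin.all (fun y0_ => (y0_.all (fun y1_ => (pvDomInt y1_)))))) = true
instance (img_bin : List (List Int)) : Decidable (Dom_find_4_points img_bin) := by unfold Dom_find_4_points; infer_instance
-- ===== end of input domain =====

-- B replaces A's two flag-driven nested index scans by one comprehension collecting the white-pixel
-- coordinates and min/max reductions with lexicographic keys (objective: simpler; same asymptotic cost).

-- ===== PORT A =====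
def find_4_points (img_bin : List (List Int)) : List (List Int) :=
  -- a,b,c,d = [0,0]×4; t = True; row-major scan sets a at the first white pixel, c at every one
  let n : Int := (img_bin.length : Int)
  let s1 : Bool × List Int × List Int :=
    (PySem.List.pyRange 0 n 1).foldl (fun st i =>
      (PySem.List.pyRange 0 ((PySem.List.pyGetD img_bin i []).length : Int) 1).foldl (fun st j =>
        if PySem.List.pyGetD (PySem.List.pyGetD img_bin i []) j 0 == 255 then
          (false, if st.1 then [j, i] else st.2.1, [j, i])
        else st) st)
      (true, [0, 0], [0, 0])
  -- t = True; column-major scan (j over len(img_bin[0])) sets b at the first white pixel, d at every one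
  let s2 : Bool × List Int × List Int :=
    (PySem.List.pyRange 0 ((PySem.List.pyGetD img_bin 0 []).length : Int) 1).foldl (fun st j =>
      (PySem.List.pyRange 0 n 1).foldl (fun st i =>
        if PySem.List.pyGetD (PySem.List.pyGetD img_bin i []) j 0 == 255 then
          (false, if st.1 then [j, i] else st.2.1, [j, i])
        else st) st)
      (true, [0, 0], [0, 0])
  [s1.2.1, s2.2.1, s1.2.2, s2.2.2]

-- ===== PORT B =====
def find_4_points_alt (img_bin : List (List Int)) : List (List Int) :=
  let pts : List (Int × Int) :=
    (PySem.List.enumerate img_bin 0).flatMap (fun p =>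
      ((PySem.List.enumerate p.2 0).filter (fun q => q.2 == 255)).map (fun q => (p.1, q.1)))
  if pts.isEmpty then [[0, 0], [0, 0], [0, 0], [0, 0]]
  else
    let a : List Int := match PySem.List.min2? pts (fun p => p.1) (fun p => p.2) with
      | some m => [m.2, m.1] | none => [0, 0]
    let c : List Int := match PySem.List.max2? pts (fun p => p.1) (fun p => p.2) with
      | some m => [m.2, m.1] | none => [0, 0]
    let swapped : List (Int × Int) := pts.map (fun p => (p.2, p.1))
    let b : List Int := match PySem.List.min2? swapped (fun p => p.1) (fun p => p.2) with
      | some m => [m.1, m.2] | none => [0, 0]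
    let d : List Int := match PySem.List.max2? swapped (fun p => p.1) (fun p => p.2) with
      | some m => [m.1, m.2] | none => [0, 0]
    [a, b, c, d]

-- ===== PRECONDITION & SPEC =====
-- Pre_ excludes exactly the inputs where A raises IndexError: the empty image, and images with a
-- row shorter than row 0 (A's column scan indexes img_bin[i][j] for every j < len(img_bin[0])).
def Pre_find_4_points (img_bin : List (List Int)) : Prop :=
  img_bin ≠ [] ∧ ∀ row ∈ img_bin, (img_bin.headD []).length ≤ row.length
instance (img_bin : List (List Int)) : Decidable (Pre_find_4_points img_bin) := by
  unfold Pre_find_4_points; infer_instance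

def pvWitness_find_4_points : List (List Int) := [[255, 0], [0, 255]]

-- On ragged images where some row carries a white pixel (255) in a column ≥ len(img_bin[0]), A's
-- column scan stops at column len(img_bin[0])-1 and silently misses that pixel in b/d, while B
-- reads the extremes off ALL white pixels — the intended extreme points of the image.
def D_find_4_points (img_bin : List (List Int)) : Prop :=
  ∃ row ∈ img_bin, 255 ∈ row.drop (img_bin.headD []).length
instance (img_bin : List (List Int)) : Decidable (D_find_4_points img_bin) := by
  unfold D_find_4_points; infer_instance

def Spec_find_4_points (img_bin : List (List Int)) (out : List (List Int)) : Prop := ¬ D_find_4_points img_bin → out = find_4_points_alt img_bin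
instance (img_bin : List (List Int)) (out : List (List Int)) : Decidable (Spec_find_4_points img_bin out) := by unfold Spec_find_4_points; infer_instance

def pvDiffWitness_find_4_points : List (List Int) := [[255], [0, 255]]
def pvDiffWitnessOut_find_4_points : (List (List Int)) × (List (List Int)) :=
  ([[0, 0], [0, 0], [1, 1], [0, 0]], [[0, 0], [0, 0], [1, 1], [1, 1]])

-- ===== CLAIM (what is proved, stated in full; the proofs are below) =====
def Claim_unchanged_find_4_points : Prop := ∀ (img_bin : List (List Int)), Dom_find_4_points img_bin → Pre_find_4_points img_bin → Spec_find_4_points img_bin (find_4_points img_bin)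
def Claim_changed_find_4_points : Prop := Dom_find_4_points (pvDiffWitness_find_4_points) ∧ Pre_find_4_points (pvDiffWitness_find_4_points) ∧ D_find_4_points (pvDiffWitness_find_4_points) ∧ find_4_points (pvDiffWitness_find_4_points) = pvDiffWitnessOut_find_4_points.1 ∧ find_4_points_alt (pvDiffWitness_find_4_points) = pvDiffWitnessOut_find_4_points.2 ∧ pvDiffWitnessOut_find_4_points.1 ≠ pvDiffWitnessOut_find_4_points.2
def Claim_exact_find_4_points : Prop := ∀ (img_bin : List (List Int)), Dom_find_4_points img_bin → Pre_find_4_points img_bin → D_find_4_points img_bin → find_4_points img_bin ≠ find_4_points_alt img_bin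

-- ===== LEMMAS AND PROOFS =====

-- strict lexicographic order on coordinate pairs
def pvLt (p q : Int × Int) : Prop := p.1 < q.1 ∨ (p.1 = q.1 ∧ p.2 < q.2)

-- the state update both of A's scans perform at a white pixel, abstracted over the written value
def pvStep (f : Int × Int → List Int) (st : Bool × List Int × List Int) (p : Int × Int) :
    Bool × List Int × List Int :=
  (false, if st.1 then f p else st.2.1, f p)

-- row-major white pixel list, in A's terms
def pvP1 (img : List (List Int)) : List (Int × Int) :=
  (PySem.List.pyRange 0 (img.length : Int) 1).flatMap (fun i =>
    ((PySem.List.pyRange 0 ((PySem.List.pyGetD img i []).length : Int) 1).filter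
      (fun j => PySem.List.pyGetD (PySem.List.pyGetD img i []) j 0 == 255)).map (fun j => (i, j)))

-- column-major white pixel list (pairs (j, i)), in A's terms
def pvP2 (img : List (List Int)) : List (Int × Int) :=
  (PySem.List.pyRange 0 ((PySem.List.pyGetD img 0 []).length : Int) 1).flatMap (fun j =>
    ((PySem.List.pyRange 0 (img.length : Int) 1).filter
      (fun i => PySem.List.pyGetD (PySem.List.pyGetD img i []) j 0 == 255)).map (fun i => (j, i)))

lemma pvFoldl_flatMap {α β σ : Type} (l : List α) (g : α → List β) (f : σ → β → σ) (init : σ) :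
    (l.flatMap g).foldl f init = l.foldl (fun st x => (g x).foldl f st) init := by
  induction l generalizing init with
  | nil => rfl
  | cons x t ih => simp [List.flatMap_cons, List.foldl_append, ih]

lemma pvStep_false (f : Int × Int → List Int) (l : List (Int × Int)) (a c : List Int) :
    l.foldl (pvStep f) (false, a, c) =
      (false, a, match l.getLast? with | none => c | some x => f x) := by
  induction l generalizing c with
  | nil => rfl
  | cons x t ih =>
    simp only [List.foldl_cons, pvStep, Bool.false_eq_true, if_false]
    rw [ih]
    cases t with
    | nil => rfl
    | cons y u =>
      cases h : (y :: u).getLast? with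
      | none => simp at h
      | some z => simp [h]

lemma pvCapture (f : Int × Int → List Int) (l : List (Int × Int)) (a c : List Int) :
    l.foldl (pvStep f) (true, a, c) =
      match l with
      | [] => (true, a, c)
      | h :: t => (false, f h, f ((h :: t).getLast (by simp))) := by
  cases l with
  | nil => rfl
  | cons h t =>
    simp only [List.foldl_cons, pvStep]
    rw [pvStep_false]
    cases t with
    | nil => rfl
    | cons y u => simp [List.getLast?_eq_some_getLast]

-- generic: a first-extremal foldl (Python min/max) over relation R, applied to min2?/max2? below
lemma pvFoldExt {R : Int × Int → Int × Int → Prop}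
    (hirr : ∀ a : Int × Int, ¬ R a a)
    (htrans : ∀ {a b c : Int × Int}, R a b → R b c → R a c)
    (hmix : ∀ {a b c : Int × Int}, ¬ R b a → R b c → R a c)
    (f : Option (Int × Int) → Int × Int → Option (Int × Int))
    (hyes : ∀ m x, R x m → f (some m) x = some x)
    (hno : ∀ m x, ¬ R x m → f (some m) x = some m)
    (t : List (Int × Int)) :
    ∀ p0 : Int × Int, ∃ r, t.foldl f (some p0) = some r ∧ r ∈ p0 :: t ∧
      ∀ y ∈ p0 :: t, ¬ R y r := by
  induction t with
  | nil =>
    intro p0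
    exact ⟨p0, rfl, by simp, by simpa using hirr p0⟩
  | cons x t ih =>
    intro p0
    rw [List.foldl_cons]
    by_cases hc : R x p0
    · obtain ⟨r, hfold, hrmem, hrmin⟩ := ih x
      rw [hyes p0 x hc]
      refine ⟨r, hfold, ?_, ?_⟩
      · rcases List.mem_cons.mp hrmem with rfl | h
        · exact List.mem_cons_of_mem _ List.mem_cons_self
        · exact List.mem_cons_of_mem _ (List.mem_cons_of_mem _ h)
      · intro y hy
        rcases List.mem_cons.mp hy with rfl | hy'
        · exact fun hyr => hrmin x List.mem_cons_self (htrans hc hyr)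
        · exact hrmin y hy'
    · obtain ⟨r, hfold, hrmem, hrmin⟩ := ih p0
      rw [hno p0 x hc]
      refine ⟨r, hfold, ?_, ?_⟩
      · rcases List.mem_cons.mp hrmem with rfl | h
        · exact List.mem_cons_self
        · exact List.mem_cons_of_mem _ (List.mem_cons_of_mem _ h)
      · intro y hy
        rcases List.mem_cons.mp hy with rfl | hy'
        · exact hrmin y List.mem_cons_self
        · rcases List.mem_cons.mp hy' with rfl | hy''
          · exact fun hxr => hrmin p0 List.mem_cons_self (hmix hc hxr)
          · exact hrmin y (List.mem_cons_of_mem _ hy'')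

lemma pvExtremal_eq_head {R : Int × Int → Int × Int → Prop}
    (hirr : ∀ a : Int × Int, ¬ R a a)
    (htrans : ∀ {a b c : Int × Int}, R a b → R b c → R a c)
    (hmix : ∀ {a b c : Int × Int}, ¬ R b a → R b c → R a c)
    (f : Option (Int × Int) → Int × Int → Option (Int × Int))
    (hnone : ∀ x, f none x = some x)
    (hyes : ∀ m x, R x m → f (some m) x = some x)
    (hno : ∀ m x, ¬ R x m → f (some m) x = some m)
    (l m : List (Int × Int)) (hm : m.Pairwise R) (hmem : ∀ x, x ∈ l ↔ x ∈ m) :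
    l.foldl f none = m.head? := by
  cases m with
  | nil =>
    have : l = [] := List.eq_nil_iff_forall_not_mem.mpr (fun x hx => by simpa using (hmem x).mp hx)
    subst this; rfl
  | cons h t =>
    have hl : h ∈ l := (hmem h).mpr List.mem_cons_self
    cases l with
    | nil => simp at hl
    | cons a l' =>
      rw [List.foldl_cons, hnone]
      obtain ⟨r, hfold, hrmem, hrmin⟩ := pvFoldExt hirr (fun h1 h2 => htrans h1 h2)
        (fun h1 h2 => hmix h1 h2) f hyes hno l' a
      rw [hfold]
      have hrm : r ∈ h :: t := (hmem r).mp hrmem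
      rcases List.mem_cons.mp hrm with rfl | hrt
      · rfl
      · exfalso
        have hhr : R h r := (List.pairwise_cons.mp hm).1 r hrt
        exact hrmin h ((hmem h).mpr List.mem_cons_self) hhr

lemma pvLt_irr (a : Int × Int) : ¬ pvLt a a := by simp [pvLt]
lemma pvLt_trans {a b c : Int × Int} : pvLt a b → pvLt b c → pvLt a c := by
  simp only [pvLt]; omega
lemma pvLt_mix {a b c : Int × Int} : ¬ pvLt b a → pvLt b c → pvLt a c := by
  simp only [pvLt]; omega
lemma pvGt_mix {a b c : Int × Int} : ¬ pvLt a b → pvLt c b → pvLt c a := by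
  simp only [pvLt]; omega

lemma pvMin2_eq_head (l m : List (Int × Int)) (hm : m.Pairwise pvLt)
    (hmem : ∀ x, x ∈ l ↔ x ∈ m) :
    PySem.List.min2? l (fun p => p.1) (fun p => p.2) = m.head? := by
  unfold PySem.List.min2?
  refine pvExtremal_eq_head (R := pvLt) pvLt_irr (fun h1 h2 => pvLt_trans h1 h2)
    (fun h1 h2 => pvLt_mix h1 h2) _ (fun x => rfl) ?_ ?_ l m hm hmem
  · intro m' x hR
    have : (decide (x.1 < m'.1) || !decide (m'.1 < x.1) && decide (x.2 < m'.2)) = true := by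
      simp only [pvLt] at hR; simp; omega
    simp [this]
  · intro m' x hR
    have : (decide (x.1 < m'.1) || !decide (m'.1 < x.1) && decide (x.2 < m'.2)) = false := by
      simp only [pvLt] at hR; simp; omega
    simp [this]

lemma pvMax2_eq_getLast (l m : List (Int × Int)) (hm : m.Pairwise pvLt)
    (hmem : ∀ x, x ∈ l ↔ x ∈ m) :
    PySem.List.max2? l (fun p => p.1) (fun p => p.2) = m.getLast? := by
  unfold PySem.List.max2?
  rw [← List.head?_reverse]
  refine pvExtremal_eq_head (R := fun a b => pvLt b a) (fun a => pvLt_irr a)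
    (fun h1 h2 => pvLt_trans h2 h1) (fun h1 h2 => pvGt_mix h1 h2) _ (fun x => rfl) ?_ ?_
    l m.reverse (by rw [List.pairwise_reverse]; exact hm) (fun x => by
      rw [List.mem_reverse]; exact hmem x)
  · intro m' x hR
    have : (decide (m'.1 < x.1) || !decide (x.1 < m'.1) && decide (m'.2 < x.2)) = true := by
      simp only [pvLt] at hR; simp; omega
    simp [this]
  · intro m' x hR
    have : (decide (m'.1 < x.1) || !decide (x.1 < m'.1) && decide (m'.2 < x.2)) = false := by
      simp only [pvLt] at hR; simp; omega
    simp [this]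

lemma pvEnumerate_eq_map_range {α : Type} (xs : List α) (d : α) (s : Int) :
    PySem.List.enumerate xs s =
      (PySem.List.pyRange s (s + (xs.length : Int)) 1).map
        (fun i => (i, PySem.List.pyGetD xs (i - s) d)) := by
  induction xs generalizing s with
  | nil =>
    rw [PySem.List.enumerate_nil, PySem.List.pyRange_one_eq_nil (by simp)]
    rfl
  | cons x xs ih =>
    rw [PySem.List.enumerate_cons, ih (s + 1)]
    have hlt : s < s + (((x :: xs).length : Nat) : Int) := by push_cast [List.length_cons]; omega
    rw [PySem.List.pyRange_one_cons hlt, List.map_cons]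
    have hrange : s + (((x :: xs).length : Nat) : Int) = (s + 1) + ((xs.length : Nat) : Int) := by
      push_cast [List.length_cons]; ring
    congr 1
    · simp [PySem.List.pyGetD_zero_cons]
    · rw [← hrange]
      apply List.map_congr_left
      intro i hi
      rw [PySem.List.mem_pyRange_one] at hi
      have h1 : 0 ≤ i - (s + 1) := by omega
      have h2 : i - (s + 1) < (xs.length : Int) := by push_cast [List.length_cons] at hi ⊢; omega
      have h3 : 0 ≤ i - s := by omega
      have h4 : i - s < ((x :: xs).length : Int) := by push_cast [List.length_cons] at hi ⊢; omega
      rw [PySem.List.pyGetD_eq_getElem xs d h1 h2, PySem.List.pyGetD_eq_getElem (x :: xs) d h3 h4]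
      have : (i - s).toNat = (i - (s + 1)).toNat + 1 := by omega
      simp [this]

lemma pvPts_eq_P1 (img : List (List Int)) :
    (PySem.List.enumerate img 0).flatMap (fun p =>
      ((PySem.List.enumerate p.2 0).filter (fun q => q.2 == 255)).map (fun q => (p.1, q.1)))
    = pvP1 img := by
  have hinner : ∀ (i : Int) (row : List Int),
      ((PySem.List.enumerate row 0).filter (fun q => q.2 == 255)).map (fun q => (i, q.1))
      = ((PySem.List.pyRange 0 ((row.length : Nat) : Int) 1).filter
          (fun j => PySem.List.pyGetD row j 0 == 255)).map (fun j => (i, j)) := by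
    intro i row
    rw [pvEnumerate_eq_map_range row 0 0]
    simp only [Int.zero_add, Int.sub_zero, List.filter_map, List.map_map]
    rfl
  unfold pvP1
  rw [pvEnumerate_eq_map_range img [] 0, List.flatMap_map]
  simp only [Int.zero_add, Int.sub_zero]
  congr 1
  funext i
  exact hinner i _

lemma pvFlat_pairwise (outer : List Int) (houter : outer.Pairwise (· < ·))
    (bound : Int → Int) (pred : Int → Int → Bool) :
    (outer.flatMap (fun a =>
      ((PySem.List.pyRange 0 (bound a) 1).filter (pred a)).map (fun b => (a, b)))).Pairwise pvLt := by
  rw [List.flatMap_def, List.pairwise_flatten]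
  constructor
  · intro l hl
    obtain ⟨a, _, rfl⟩ := List.mem_map.mp hl
    rw [List.pairwise_map]
    exact (List.Pairwise.filter (pred a)
      ((PySem.List.pairwise_lt_pyRange_one 0 (bound a)).imp (fun h => h))).imp
      (fun h => Or.inr ⟨rfl, h⟩)
  · rw [List.pairwise_map]
    refine houter.imp ?_
    intro a1 a2 hlt x hx y hy
    obtain ⟨b1, _, rfl⟩ := List.mem_map.mp hx
    obtain ⟨b2, _, rfl⟩ := List.mem_map.mp hy
    exact Or.inl hlt

lemma pvP1_pairwise (img : List (List Int)) : (pvP1 img).Pairwise pvLt := by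
  unfold pvP1
  exact pvFlat_pairwise _ (PySem.List.pairwise_lt_pyRange_one 0 _) _ _

lemma pvP2_pairwise (img : List (List Int)) : (pvP2 img).Pairwise pvLt := by
  unfold pvP2
  exact pvFlat_pairwise _ (PySem.List.pairwise_lt_pyRange_one 0 _) _ _

lemma pvFlat_mem (outer : List Int) (bound : Int → Int) (pred : Int → Int → Bool) (x : Int × Int) :
    (x ∈ outer.flatMap (fun a =>
      ((PySem.List.pyRange 0 (bound a) 1).filter (pred a)).map (fun b => (a, b))))
    ↔ x.1 ∈ outer ∧ 0 ≤ x.2 ∧ x.2 < bound x.1 ∧ pred x.1 x.2 = true := by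
  obtain ⟨x1, x2⟩ := x
  simp only [List.mem_flatMap, List.mem_map, List.mem_filter, PySem.List.mem_pyRange_one]
  constructor
  · rintro ⟨a, ha, b, ⟨⟨hb0, hb1⟩, hp⟩, heq⟩
    injection heq with h1 h2
    subst h1; subst h2
    exact ⟨ha, hb0, hb1, hp⟩
  · rintro ⟨ha, hb0, hb1, hp⟩
    exact ⟨x1, ha, x2, ⟨⟨hb0, hb1⟩, hp⟩, rfl⟩

lemma pvMem_P1 (img : List (List Int)) (x : Int × Int) :
    x ∈ pvP1 img ↔ 0 ≤ x.1 ∧ x.1 < (img.length : Int) ∧ 0 ≤ x.2 ∧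
      x.2 < ((PySem.List.pyGetD img x.1 []).length : Int) ∧
      PySem.List.pyGetD (PySem.List.pyGetD img x.1 []) x.2 0 = 255 := by
  unfold pvP1
  rw [pvFlat_mem]
  simp only [PySem.List.mem_pyRange_one, beq_iff_eq]
  tauto

lemma pvMem_P2 (img : List (List Int)) (x : Int × Int) :
    x ∈ pvP2 img ↔ 0 ≤ x.1 ∧ x.1 < ((PySem.List.pyGetD img 0 []).length : Int) ∧ 0 ≤ x.2 ∧
      x.2 < (img.length : Int) ∧
      PySem.List.pyGetD (PySem.List.pyGetD img x.2 []) x.1 0 = 255 := by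
  unfold pvP2
  rw [pvFlat_mem]
  simp only [PySem.List.mem_pyRange_one, beq_iff_eq]
  tauto

-- under Pre_, every in-range row has at least len(img[0]) columns
lemma pvRect_cols (img : List (List Int)) (hpre : Pre_find_4_points img) (i : Int)
    (h0 : 0 ≤ i) (h1 : i < (img.length : Int)) :
    ((PySem.List.pyGetD img 0 []).length : Int) ≤ ((PySem.List.pyGetD img i []).length : Int) := by
  have hmem : PySem.List.pyGetD img i [] ∈ img :=
    PySem.List.pyGetD_mem img [] (by simp [PySem.Raise.InRange]; omega)
  have hle := hpre.2 _ hmem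
  cases img with
  | nil => simp at h1; omega
  | cons h t =>
    rw [PySem.List.pyGetD_zero_cons]
    simp only [List.headD_cons] at hle
    exact_mod_cast hle

lemma pvMem_swapped (img : List (List Int)) (hpre : Pre_find_4_points img)
    (hnD : ¬ D_find_4_points img) (x : Int × Int) :
    (x ∈ (pvP1 img).map (fun p => (p.2, p.1))) ↔ x ∈ pvP2 img := by
  obtain ⟨x1, x2⟩ := x
  simp only [List.mem_map]
  rw [pvMem_P2]
  constructor
  · rintro ⟨p, hp1, heq⟩
    injection heq with h1 h2
    subst h1; subst h2
    rw [pvMem_P1] at hp1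
    obtain ⟨ha, hb, hc, hd, he⟩ := hp1
    refine ⟨hc, ?_, ha, hb, he⟩
    -- were p.2 ≥ len(img[0]), the white pixel would witness D_
    by_contra hge
    push Not at hge
    apply hnD
    refine ⟨PySem.List.pyGetD img p.1 [], PySem.List.pyGetD_mem img []
      (by simp [PySem.Raise.InRange]; omega), ?_⟩
    have hcols : (img.headD []).length = (PySem.List.pyGetD img 0 []).length := by
      cases img with
      | nil => simp at hb; omega
      | cons h t => rw [PySem.List.pyGetD_zero_cons]; rfl
    rw [hcols]
    set row := PySem.List.pyGetD img p.1 [] with hrow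
    have hjn : p.2.toNat < row.length := by omega
    have hcn : (PySem.List.pyGetD img 0 []).length ≤ p.2.toNat := by omega
    have hval : row[p.2.toNat] = 255 := by
      have := PySem.List.pyGetD_eq_getElem row 0 hc hd
      rw [this] at he
      exact he
    rw [← hval]
    have hmem2 : (row.drop (PySem.List.pyGetD img 0 []).length)[p.2.toNat - (PySem.List.pyGetD img 0 []).length]'(by
        rw [List.length_drop]; omega) ∈ row.drop (PySem.List.pyGetD img 0 []).length := List.getElem_mem _
    have heq2 : (row.drop (PySem.List.pyGetD img 0 []).length)[p.2.toNat - (PySem.List.pyGetD img 0 []).length]'(by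
        rw [List.length_drop]; omega) = row[p.2.toNat] := by
      rw [List.getElem_drop]; congr 1; omega
    exact heq2 ▸ hmem2
  · rintro ⟨h1, h2, h3, h4, h5⟩
    refine ⟨(x2, x1), ?_, rfl⟩
    rw [pvMem_P1]
    refine ⟨h3, h4, h1, lt_of_lt_of_le h2 (pvRect_cols img hpre x2 h3 h4), h5⟩

lemma pvLoop1 (img : List (List Int)) :
    ((PySem.List.pyRange 0 ((img.length : Int)) 1).foldl (fun st i =>
      (PySem.List.pyRange 0 ((PySem.List.pyGetD img i []).length : Int) 1).foldl (fun st j =>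
        if PySem.List.pyGetD (PySem.List.pyGetD img i []) j 0 == 255 then
          (false, if st.1 then [j, i] else st.2.1, [j, i])
        else st) st)
      ((true, [0, 0], [0, 0]) : Bool × List Int × List Int))
    = (pvP1 img).foldl (pvStep (fun p => [p.2, p.1])) (true, [0, 0], [0, 0]) := by
  have hin : ∀ (st : Bool × List Int × List Int) (i : Int),
      ((PySem.List.pyRange 0 ((PySem.List.pyGetD img i []).length : Int) 1).foldl (fun st j =>
        if PySem.List.pyGetD (PySem.List.pyGetD img i []) j 0 == 255 then
          (false, if st.1 then [j, i] else st.2.1, [j, i])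
        else st) st)
      = (((PySem.List.pyRange 0 ((PySem.List.pyGetD img i []).length : Int) 1).filter
          (fun j => PySem.List.pyGetD (PySem.List.pyGetD img i []) j 0 == 255)).map
            (fun j => (i, j))).foldl (pvStep (fun p => [p.2, p.1])) st := by
    intro st i
    rw [PySem.List.foldl_if_eq_foldl_filter
      (p := fun j => PySem.List.pyGetD (PySem.List.pyGetD img i []) j 0 == 255)
      (f := fun st j => ((false, if st.1 then [j, i] else st.2.1, [j, i]) : Bool × List Int × List Int)),
      List.foldl_map]
    rfl
  unfold pvP1
  rw [pvFoldl_flatMap]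
  simp only [hin]

lemma pvLoop2 (img : List (List Int)) :
    ((PySem.List.pyRange 0 ((PySem.List.pyGetD img 0 []).length : Int) 1).foldl (fun st j =>
      (PySem.List.pyRange 0 ((img.length : Int)) 1).foldl (fun st i =>
        if PySem.List.pyGetD (PySem.List.pyGetD img i []) j 0 == 255 then
          (false, if st.1 then [j, i] else st.2.1, [j, i])
        else st) st)
      ((true, [0, 0], [0, 0]) : Bool × List Int × List Int))
    = (pvP2 img).foldl (pvStep (fun p => [p.1, p.2])) (true, [0, 0], [0, 0]) := by
  have hin : ∀ (st : Bool × List Int × List Int) (j : Int),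
      ((PySem.List.pyRange 0 ((img.length : Nat) : Int) 1).foldl (fun st i =>
        if PySem.List.pyGetD (PySem.List.pyGetD img i []) j 0 == 255 then
          (false, if st.1 then [j, i] else st.2.1, [j, i])
        else st) st)
      = (((PySem.List.pyRange 0 ((img.length : Nat) : Int) 1).filter
          (fun i => PySem.List.pyGetD (PySem.List.pyGetD img i []) j 0 == 255)).map
            (fun i => (j, i))).foldl (pvStep (fun p => [p.1, p.2])) st := by
    intro st j
    rw [PySem.List.foldl_if_eq_foldl_filter
      (p := fun i => PySem.List.pyGetD (PySem.List.pyGetD img i []) j 0 == 255)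
      (f := fun st i => ((false, if st.1 then [j, i] else st.2.1, [j, i]) : Bool × List Int × List Int)),
      List.foldl_map]
    rfl
  unfold pvP2
  rw [pvFoldl_flatMap]
  simp only [hin]

-- ===== VERDICT (by name: the statement is the Claim_ definition above) =====
theorem find_4_points_spec : Claim_unchanged_find_4_points := by
  intro img _ hpre hnD
  unfold find_4_points find_4_points_alt
  simp only [pvLoop1 img, pvLoop2 img, pvPts_eq_P1 img]
  rw [pvCapture, pvCapture,
    pvMin2_eq_head (pvP1 img) (pvP1 img) (pvP1_pairwise img) (fun _ => Iff.rfl),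
    pvMax2_eq_getLast (pvP1 img) (pvP1 img) (pvP1_pairwise img) (fun _ => Iff.rfl),
    pvMin2_eq_head _ (pvP2 img) (pvP2_pairwise img) (pvMem_swapped img hpre hnD),
    pvMax2_eq_getLast _ (pvP2 img) (pvP2_pairwise img) (pvMem_swapped img hpre hnD)]
  have hswap := pvMem_swapped img hpre hnD
  cases hP1 : pvP1 img with
  | nil =>
    have hP2 : pvP2 img = [] := by
      rw [List.eq_nil_iff_forall_not_mem]
      intro x hx
      have := (hswap x).mpr hx
      rw [hP1] at this
      simp at this
    rw [hP2]
    simp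
  | cons h1 t1 =>
    cases hP2 : pvP2 img with
    | nil =>
      exfalso
      have := (hswap (h1.2, h1.1)).mp (by
        rw [hP1]; exact List.mem_map.mpr ⟨h1, List.mem_cons_self, rfl⟩)
      rw [hP2] at this
      simp at this
    | cons h2 t2 =>
      simp [List.getLast?_eq_some_getLast]

-- a maximal element of a nonempty list, as max2? computes it
lemma pvFoldExtNone {R : Int × Int → Int × Int → Prop}
    (hirr : ∀ a : Int × Int, ¬ R a a)
    (htrans : ∀ {a b c : Int × Int}, R a b → R b c → R a c)
    (hmix : ∀ {a b c : Int × Int}, ¬ R b a → R b c → R a c)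
    (f : Option (Int × Int) → Int × Int → Option (Int × Int))
    (hnone : ∀ x, f none x = some x)
    (hyes : ∀ m x, R x m → f (some m) x = some x)
    (hno : ∀ m x, ¬ R x m → f (some m) x = some m)
    (l : List (Int × Int)) (h : l ≠ []) :
    ∃ r, l.foldl f none = some r ∧ r ∈ l ∧ ∀ y ∈ l, ¬ R y r := by
  cases l with
  | nil => exact absurd rfl h
  | cons x t =>
    rw [List.foldl_cons, hnone]
    exact pvFoldExt hirr (fun h1 h2 => htrans h1 h2) (fun h1 h2 => hmix h1 h2) f hyes hno t x

lemma pvMax2_spec (l : List (Int × Int)) (h : l ≠ []) :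
    ∃ m, PySem.List.max2? l (fun p => p.1) (fun p => p.2) = some m ∧ m ∈ l ∧
      ∀ y ∈ l, ¬ pvLt m y := by
  unfold PySem.List.max2?
  refine pvFoldExtNone (R := fun a b => pvLt b a) (fun a => pvLt_irr a)
    (fun h1 h2 => pvLt_trans h2 h1) (fun h1 h2 => pvGt_mix h1 h2) _ (fun x => rfl) ?_ ?_ l h
  · intro m' x hR
    have : (decide (m'.1 < x.1) || !decide (x.1 < m'.1) && decide (m'.2 < x.2)) = true := by
      simp only [pvLt] at hR; simp; omega
    simp [this]
  · intro m' x hR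
    have : (decide (m'.1 < x.1) || !decide (x.1 < m'.1) && decide (m'.2 < x.2)) = false := by
      simp only [pvLt] at hR; simp; omega
    simp [this]

-- the white pixel D_ asserts, as a member of the row-major pixel list with column ≥ len(img[0])
lemma pvD_pixel (img : List (List Int)) (hpre : Pre_find_4_points img)
    (hD : D_find_4_points img) :
    ∃ p : Int × Int, p ∈ pvP1 img ∧ ((PySem.List.pyGetD img 0 []).length : Int) ≤ p.2 := by
  obtain ⟨row, hrowmem, h255⟩ := hD
  obtain ⟨k, hk, hkeq⟩ := List.mem_iff_getElem.mp hrowmem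
  obtain ⟨t, ht, hteq⟩ := List.mem_iff_getElem.mp h255
  have hc0 : (img.headD []).length = (PySem.List.pyGetD img 0 []).length := by
    cases img with
    | nil => exact absurd rfl hpre.1
    | cons h tl => rw [PySem.List.pyGetD_zero_cons]; rfl
  rw [List.length_drop] at ht
  have hrowk : PySem.List.pyGetD img (k : Int) [] = row := by
    rw [PySem.List.pyGetD_eq_getElem img [] (by positivity) (by exact_mod_cast hk)]
    simpa using hkeq
  refine ⟨((k : Int), ((img.headD []).length + t : Nat)), ?_, ?_⟩
  · rw [pvMem_P1]
    dsimp only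
    refine ⟨by positivity, by exact_mod_cast hk, by positivity, ?_, ?_⟩
    · rw [hrowk]; exact_mod_cast (by omega : (img.headD []).length + t < row.length)
    · rw [hrowk,
        PySem.List.pyGetD_eq_getElem row 0 (by positivity)
          (by exact_mod_cast (by omega : (img.headD []).length + t < row.length))]
      rw [List.getElem_drop] at hteq
      simpa using hteq
  · dsimp only
    rw [← hc0]
    exact_mod_cast Nat.le_add_right _ _

theorem find_4_points_tight : Claim_exact_find_4_points := by
  intro img _ hpre hD heq
  obtain ⟨p, hpP1, hpcols⟩ := pvD_pixel img hpre hD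
  have hP1ne : pvP1 img ≠ [] := fun hnil => by rw [hnil] at hpP1; simp at hpP1
  have hswne : (pvP1 img).map (fun p => (p.2, p.1)) ≠ [] := by simpa using hP1ne
  obtain ⟨m, hm, hmmem, hmmax⟩ := pvMax2_spec ((pvP1 img).map (fun p => (p.2, p.1))) hswne
  -- m is the lexicographic maximum of the swapped pixels, so m.1 ≥ p.2 ≥ len(img[0])
  have hpm : (p.2, p.1) ∈ (pvP1 img).map (fun p => (p.2, p.1)) :=
    List.mem_map.mpr ⟨p, hpP1, rfl⟩
  have hm1 : ((PySem.List.pyGetD img 0 []).length : Int) ≤ m.1 := by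
    have := hmmax _ hpm
    simp only [pvLt] at this
    omega
  obtain ⟨q, hqmem, hqswap⟩ := List.mem_map.mp hmmem
  rw [pvMem_P1] at hqmem
  -- compare the last elements (the d points) of the two results
  have hd := congrArg List.getLast? heq
  unfold find_4_points find_4_points_alt at hd
  simp only [pvLoop1 img, pvLoop2 img, pvPts_eq_P1 img] at hd
  rw [pvCapture, pvCapture] at hd
  cases hP1 : pvP1 img with
  | nil => exact hP1ne hP1
  | cons h1 t1 =>
    have hm' : PySem.List.max2? ((h1 :: t1).map (fun p => (p.2, p.1)))
        (fun p => p.1) (fun p => p.2) = some m := hP1 ▸ hm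
    rw [hP1] at hd
    simp only [List.isEmpty_cons, Bool.false_eq_true, if_false, hm'] at hd
    cases hP2 : pvP2 img with
    | nil =>
      -- A's d = [0,0], B's d = [m.1, m.2]; m = (q.2, q.1) for a real pixel q, so m ≠ (0,0)
      rw [hP2] at hd
      simp only [List.getLast?_cons_cons, List.getLast?_singleton, Option.some.injEq,
        List.cons.injEq, and_true] at hd
      have hq1 : q.2 = m.1 := congrArg Prod.fst hqswap
      have hq2 : q.1 = m.2 := congrArg Prod.snd hqswap
      -- q sits at column q.2 = m.1 = 0 of row q.1 = m.2 = 0, so row 0 is nonempty: cols ≥ 1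
      have hcol0 : (0 : Int) < ((PySem.List.pyGetD img q.1 []).length : Int) := by omega
      have : q.1 = 0 := by omega
      rw [this] at hcol0
      omega
    | cons h2 t2 =>
      -- A's d is an element of pvP2, whose column is < len(img[0]) ≤ m.1
      rw [hP2] at hd
      have hlastmem : (h2 :: t2).getLast (by simp) ∈ pvP2 img := by
        rw [hP2]; exact List.getLast_mem _
      rw [pvMem_P2] at hlastmem
      simp only [List.getLast?_cons_cons, List.getLast?_singleton, Option.some.injEq,
        List.cons.injEq, and_true] at hd
      omega

theorem find_4_points_changed : Claim_changed_find_4_points := by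
  unfold Claim_changed_find_4_points; decide
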